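-- pv_equiv track=rewrite | github.com/CDAT/uvcmetrics | src/python/fileio/prune_filelist.py | prune_filelist
-- ===== SOURCE A (Python) =====
-- def prune_filelist(directory, filt):
--     def filter_count(directory, filt):
--         l=len(filt)
--         fns={}
--         for fn in directory:
--             if fn.startswith(filt):
--                 s=fn[l+1:].split('_')
--                 fns[fn] = len(s)
--                 #print fn, s, len(s)
--         return fns
--     fns = filter_count(directory, filt)
--     keep_files = []
--     if len(fns.values()) != 0:
--         MIN = min(fns.values())
--         keep_files = [fn for (fn, value) in fns.items() if value == MIN]
--     return keep_files
-- ===== SOURCE B (Python) =====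
-- def prune_filelist(directory, filt):
--     skip = len(filt) + 1
--     best = None
--     keep = []
--     for fn in directory:
--         if not fn.startswith(filt):
--             continue
--         c = len(fn[skip:].split('_'))
--         if best is None or c < best:
--             best = c
--             keep = [fn]
--         elif c == best and fn not in keep:
--             keep.append(fn)
--     return keep
-- ===== Notes on version B (the rewrite author's own statement) =====
-- stated objective: simpler
-- what changed: Replaced A's dict-of-counts built first and then scanned twice (min over values, filter of items) by a single running-minimum pass that keeps best count and the kept files as it goes (skipping filenames already kept, matching dict dedup).
import Mathlib
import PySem

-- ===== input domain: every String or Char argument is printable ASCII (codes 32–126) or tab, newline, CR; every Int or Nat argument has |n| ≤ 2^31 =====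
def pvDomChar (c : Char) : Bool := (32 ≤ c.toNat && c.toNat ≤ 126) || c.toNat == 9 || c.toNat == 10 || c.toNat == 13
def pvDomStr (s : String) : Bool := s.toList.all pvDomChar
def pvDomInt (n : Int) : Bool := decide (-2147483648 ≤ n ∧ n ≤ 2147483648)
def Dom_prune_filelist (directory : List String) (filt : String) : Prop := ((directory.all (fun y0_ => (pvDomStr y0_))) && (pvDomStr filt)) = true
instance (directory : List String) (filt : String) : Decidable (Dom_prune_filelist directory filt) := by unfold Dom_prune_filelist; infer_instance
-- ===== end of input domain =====

-- B replaces A's dict-of-counts plus two extra scans (min over values, filter items) by a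
-- single running-minimum pass over the directory; objective: simpler/alternative decomposition.


-- ===== PORT A =====
-- shared helper: len(fn[len(filt)+1:].split('_')) — the underscore-part count both Pythons compute
def pvCnt (filt fn : String) : Int :=
  -- fn[len(filt)+1:].split('_') : Chars.splitOn is exact for the nonempty separator "_"
  PySem.List.len (PySem.Chars.splitOn (PySem.Str.slice fn (some (PySem.Str.len filt + 1)) none).toList "_".toList)

def prune_filelist (directory : List String) (filt : String) : List String :=
  let fns : PySem.Dict String Int :=
    directory.foldl
      (fun fns fn => if PySem.Str.startswith fn filt then fns.insert fn (pvCnt filt fn) else fns)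
      PySem.Dict.empty
  if PySem.List.len fns.values ≠ 0 then
    match PySem.List.min? fns.values (fun v => v) with
    | some MIN => fns.items.filterMap (fun p => if p.2 = MIN then some p.1 else none)
    | none => []   -- unreachable: under the guard fns.values is nonempty
  else []

-- ===== PORT B =====
def prune_filelist_alt (directory : List String) (filt : String) : List String :=
  (directory.foldl
    (fun (st : Option Int × List String) fn =>
      if PySem.Str.startswith fn filt then
        let c := pvCnt filt fn
        match st.1 with
        | none => (some c, [fn])
        | some b =>
          if c < b then (some c, [fn])
          else if c = b ∧ fn ∉ st.2 then (st.1, st.2 ++ [fn])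
          else st
      else st)
    (none, [])).2

-- ===== PRECONDITION & SPEC =====
def Spec_prune_filelist (directory : List String) (filt : String) (out : List String) : Prop := out = prune_filelist_alt directory filt
instance (directory : List String) (filt : String) (out : List String) : Decidable (Spec_prune_filelist directory filt out) := by unfold Spec_prune_filelist; infer_instance

-- ===== CLAIM (what is proved, stated in full; the proofs are below) =====
def Claim_equal_prune_filelist : Prop := ∀ (directory : List String) (filt : String), Dom_prune_filelist directory filt → Spec_prune_filelist directory filt (prune_filelist directory filt)

-- ===== LEMMAS AND PROOFS =====

-- proof-side abstraction: m is the dedup-in-order list of matching filenames seen so far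
def pvNext (filt : String) (m : List String) (fn : String) : List String :=
  if PySem.Str.startswith fn filt = true ∧ fn ∉ m then m ++ [fn] else m

def pvAcc (filt : String) (m : List String) : List String → List String
  | [] => m
  | fn :: rest => pvAcc filt (pvNext filt m fn) rest

def pvDict (filt : String) (m : List String) : PySem.Dict String Int :=
  PySem.Dict.mk (m.map fun k => (k, pvCnt filt k))

def pvMin (filt : String) (m : List String) : Option Int :=
  PySem.List.min? (m.map (pvCnt filt)) (fun v => v)

def pvKeep (filt : String) (m : List String) : List String :=
  m.filter (fun k => decide (pvMin filt m = some (pvCnt filt k)))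

def pvState (filt : String) (m : List String) : Option Int × List String :=
  (pvMin filt m, pvKeep filt m)

theorem pvDict_step (filt : String) (m : List String) (fn : String) :
    (if PySem.Str.startswith fn filt then (pvDict filt m).insert fn (pvCnt filt fn) else pvDict filt m)
      = pvDict filt (pvNext filt m fn) := by
  unfold pvNext
  by_cases hs : PySem.Str.startswith fn filt = true
  · rw [if_pos hs]
    by_cases hin : fn ∈ m
    · rw [if_neg (by simp [hin])]
      have hc : (pvDict filt m).contains fn = true := by
        rw [PySem.Dict.contains_eq_decide_mem_keys]
        simp [pvDict, PySem.Dict.keys_mk, hin]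
      apply PySem.Dict.ext
      rw [PySem.Dict.items_insert_of_contains _ _ hc]
      show List.map _ (m.map fun k => (k, pvCnt filt k)) = m.map fun k => (k, pvCnt filt k)
      rw [List.map_map]
      apply List.map_congr_left
      intro k _
      by_cases hk : k = fn <;> simp [hk]
    · rw [if_pos ⟨hs, hin⟩]
      have hc : (pvDict filt m).contains fn = false := by
        rw [PySem.Dict.contains_eq_decide_mem_keys]
        simp [pvDict, PySem.Dict.keys_mk, hin]
      apply PySem.Dict.ext
      rw [PySem.Dict.items_insert_of_not_contains _ _ hc]
      show (m.map fun k => (k, pvCnt filt k)) ++ [(fn, pvCnt filt fn)]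
          = (m ++ [fn]).map fun k => (k, pvCnt filt k)
      simp
  · rw [if_neg hs, if_neg (by tauto)]

theorem pv_foldA (filt : String) (rest m : List String) :
    rest.foldl
      (fun fns fn => if PySem.Str.startswith fn filt then fns.insert fn (pvCnt filt fn) else fns)
      (pvDict filt m)
    = pvDict filt (pvAcc filt m rest) := by
  induction rest generalizing m with
  | nil => rfl
  | cons fn rest ih => rw [List.foldl_cons, pvDict_step]; exact ih _

theorem pvMin_append (filt : String) (m : List String) (fn : String) :
    pvMin filt (m ++ [fn])
      = some (match pvMin filt m with | none => pvCnt filt fn | some b => min b (pvCnt filt fn)) := by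
  unfold pvMin
  cases m with
  | nil => rfl
  | cons x m' =>
    simp only [List.map_append, List.map_cons, List.map_nil, List.cons_append,
      PySem.List.min?_id_cons, List.foldl_append, List.foldl_cons, List.foldl_nil]

theorem pvMin_isMin (filt : String) {m : List String} {b : Int} (h : pvMin filt m = some b)
    {k : String} (hk : k ∈ m) : b ≤ pvCnt filt k :=
  PySem.List.min?_isMin h _ (List.mem_map_of_mem hk)

theorem pvState_step (filt : String) (m : List String) (fn : String) :
    (if PySem.Str.startswith fn filt then
        let c := pvCnt filt fn
        match (pvState filt m).1 with
        | none => (some c, [fn])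
        | some b =>
          if c < b then (some c, [fn])
          else if c = b ∧ fn ∉ (pvState filt m).2 then ((pvState filt m).1, (pvState filt m).2 ++ [fn])
          else pvState filt m
      else pvState filt m)
    = pvState filt (pvNext filt m fn) := by
  unfold pvNext
  by_cases hs : PySem.Str.startswith fn filt = true
  swap
  · rw [if_neg hs, if_neg (show ¬(PySem.Str.startswith fn filt = true ∧ fn ∉ m) from fun h => hs h.1)]
  rw [if_pos hs]
  cases hmin : pvMin filt m with
  | none =>
    have hm : m = [] := by
      have := (PySem.List.min?_eq_none_iff (m.map (pvCnt filt)) (fun y => y)).1 hmin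
      simpa using this
    subst hm
    rw [if_pos (show PySem.Str.startswith fn filt = true ∧ fn ∉ ([] : List String) from ⟨hs, by simp⟩)]
    show (some (pvCnt filt fn), [fn]) = pvState filt [fn]
    have h0 : pvMin filt [fn] = some (pvCnt filt fn) := rfl
    unfold pvState pvKeep
    rw [h0]
    simp
  | some b =>
    have h1 : (pvState filt m).1 = pvMin filt m := rfl
    rw [show (pvState filt m).1 = some b from h1.trans hmin]
    show (if pvCnt filt fn < b then ((some (pvCnt filt fn) : Option Int), [fn])
        else if pvCnt filt fn = b ∧ fn ∉ (pvState filt m).2 then (some b, (pvState filt m).2 ++ [fn])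
        else pvState filt m)
      = pvState filt (if PySem.Str.startswith fn filt = true ∧ fn ∉ m then m ++ [fn] else m)
    have h2 : (pvState filt m).2 = pvKeep filt m := rfl
    by_cases hin : fn ∈ m
    · rw [if_neg (show ¬(PySem.Str.startswith fn filt = true ∧ fn ∉ m) from fun h => h.2 hin)]
      have hble : b ≤ pvCnt filt fn := pvMin_isMin filt hmin hin
      rw [if_neg (show ¬ pvCnt filt fn < b by omega)]
      by_cases hcb : pvCnt filt fn = b
      · have hkeep : fn ∈ (pvState filt m).2 := by
          rw [h2]
          exact List.mem_filter.2 ⟨hin, by simp [hmin, hcb]⟩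
        rw [if_neg (show ¬(pvCnt filt fn = b ∧ fn ∉ (pvState filt m).2) from fun h => h.2 hkeep)]
      · rw [if_neg (show ¬(pvCnt filt fn = b ∧ fn ∉ (pvState filt m).2) from fun h => hcb h.1)]
    · rw [if_pos (show PySem.Str.startswith fn filt = true ∧ fn ∉ m from ⟨hs, hin⟩)]
      have hmin' : pvMin filt (m ++ [fn]) = some (min b (pvCnt filt fn)) := by
        rw [pvMin_append, hmin]
      have hkeep' : pvKeep filt (m ++ [fn])
          = m.filter (fun k => decide (some (min b (pvCnt filt fn)) = some (pvCnt filt k)))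
            ++ [fn].filter (fun k => decide (some (min b (pvCnt filt fn)) = some (pvCnt filt k))) := by
        unfold pvKeep
        rw [List.filter_append]
        congr 1 <;> exact List.filter_congr (by intro k _; rw [hmin'])
      rcases lt_trichotomy (pvCnt filt fn) b with hlt | heq | hgt
      · rw [if_pos hlt]
        have hmn : min b (pvCnt filt fn) = pvCnt filt fn := min_eq_right (le_of_lt hlt)
        have hnil : m.filter (fun k => decide (some (min b (pvCnt filt fn)) = some (pvCnt filt k))) = [] := by
          rw [List.filter_eq_nil_iff]
          intro k hk
          have := pvMin_isMin filt hmin hk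
          simp only [hmn, decide_eq_true_eq, Option.some.injEq]
          omega
        show (some (pvCnt filt fn), [fn]) = pvState filt (m ++ [fn])
        unfold pvState
        rw [hmin', hkeep', hnil, hmn]
        simp
      · have hfn_notkeep : fn ∉ (pvState filt m).2 := by
          rw [h2]
          intro hmem
          exact hin (List.mem_filter.1 hmem).1
        rw [if_neg (show ¬ pvCnt filt fn < b by omega),
          if_pos (show pvCnt filt fn = b ∧ fn ∉ (pvState filt m).2 from ⟨heq, hfn_notkeep⟩)]
        have hmn : min b (pvCnt filt fn) = b := by omega
        rw [h2]
        show (some b, pvKeep filt m ++ [fn]) = pvState filt (m ++ [fn])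
        unfold pvState
        rw [hmin', hkeep', hmn]
        congr 1
        congr 1
        · unfold pvKeep
          exact List.filter_congr (by intro k _; rw [hmin])
        · simp [heq]
      · rw [if_neg (show ¬ pvCnt filt fn < b by omega),
          if_neg (show ¬(pvCnt filt fn = b ∧ fn ∉ (pvState filt m).2) from fun h => by omega)]
        have hmn : min b (pvCnt filt fn) = b := by omega
        show pvState filt m = pvState filt (m ++ [fn])
        unfold pvState
        rw [hmin, hmin', hkeep', hmn]
        congr 1
        have hnil : [fn].filter (fun k => decide ((some b : Option Int) = some (pvCnt filt k))) = [] := by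
          simp
          omega
        rw [hnil, List.append_nil]
        unfold pvKeep
        rw [hmin]

theorem pv_foldB (filt : String) (rest m : List String) :
    rest.foldl
      (fun (st : Option Int × List String) fn =>
        if PySem.Str.startswith fn filt then
          let c := pvCnt filt fn
          match st.1 with
          | none => (some c, [fn])
          | some b =>
            if c < b then (some c, [fn])
            else if c = b ∧ fn ∉ st.2 then (st.1, st.2 ++ [fn])
            else st
        else st)
      (pvState filt m)
    = pvState filt (pvAcc filt m rest) := by
  induction rest generalizing m with
  | nil => rfl
  | cons fn rest ih => rw [List.foldl_cons, pvState_step]; exact ih _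

theorem pv_filterMap_filter {a : Type} (p : a -> Prop) [DecidablePred p] (l : List a) :
    l.filterMap (fun k => if p k then some k else none) = l.filter (fun k => decide (p k)) := by
  induction l with
  | nil => rfl
  | cons x t ih => by_cases h : p x <;> simp [h, ih]

-- ===== VERDICT (by name: the statement is the Claim_ definition above) =====
theorem prune_filelist_spec : Claim_equal_prune_filelist := by
  intro directory filt _
  unfold Spec_prune_filelist prune_filelist prune_filelist_alt
  rw [show (PySem.Dict.empty : PySem.Dict String Int) = pvDict filt [] from rfl,
    pv_foldA filt directory [],
    show ((none, []) : Option Int × List String) = pvState filt [] from rfl,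
    pv_foldB filt directory []]
  generalize pvAcc filt [] directory = M
  cases M with
  | nil => rfl
  | cons x M' =>
    have hvals : (pvDict filt (x :: M')).values = (x :: M').map (pvCnt filt) := by
      show List.map _ ((x :: M').map fun k => (k, pvCnt filt k)) = _
      rw [List.map_map]
      rfl
    show (if PySem.List.len (pvDict filt (x :: M')).values ≠ 0 then
        match PySem.List.min? (pvDict filt (x :: M')).values (fun v => v) with
        | some MIN => List.filterMap (fun p => if p.2 = MIN then some p.1 else none) (pvDict filt (x :: M')).items
        | none => []
      else []) = (pvState filt (x :: M')).2
    have hne : PySem.List.len (pvDict filt (x :: M')).values ≠ 0 := by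
      rw [hvals]
      simp [PySem.List.len_eq]
      omega
    rw [if_pos hne]
    obtain ⟨b, hb⟩ : ∃ b, PySem.List.min? (pvDict filt (x :: M')).values (fun v => v) = some b := by
      cases h : PySem.List.min? (pvDict filt (x :: M')).values (fun v => v) with
      | none =>
        have := (PySem.List.min?_eq_none_iff _ _).1 h
        rw [hvals] at this
        simp at this
      | some b => exact ⟨b, rfl⟩
    rw [hb]
    have hbmin : pvMin filt (x :: M') = some b := by
      unfold pvMin
      rw [← hvals]
      exact hb
    show List.filterMap _ ((x :: M').map fun k => (k, pvCnt filt k)) = (pvState filt (x :: M')).2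
    rw [List.filterMap_map]
    show (x :: M').filterMap (fun k => if pvCnt filt k = b then some k else none) = pvKeep filt (x :: M')
    rw [pv_filterMap_filter (fun k => pvCnt filt k = b) (x :: M')]
    unfold pvKeep
    rw [hbmin]
    apply List.filter_congr
    intro k _
    simp [eq_comm]
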